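-- pv_equiv track=rewrite | github.com/tommasoboccali/SpectrumSurveyTools | survey_barh.py | dictforbar
-- ===== SOURCE A (Python) =====
-- def dictforbar(theSlicedSurvey, theString):
--     stringQ = theString
--     plotdict = {}
--
--     for i in theSlicedSurvey:
--             answer = i[stringQ]
-- #            if answer == "":
--                 #print ("EMPTY ANSWER", i['\ufeffYour name'])
-- #        print ('Answer:',answer)
--             answers = answer.split('; ')
-- #        print (answers)
--             for j in answers:
--  #           print (j)
--                 if j in plotdict.keys():
--                     plotdict[j]=plotdict[j]+1
--                 else:
--                     plotdict[j]=1
--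
--     if "" in plotdict.keys():
--         del plotdict['']
-- #    print ("DICT for the PLOT using Query:",stringQ, "\n",plotdict)
--     return plotdict
-- ===== SOURCE B (Python) =====
-- def dictforbar(theSlicedSurvey, theString):
--     # flatten all answer tokens, then count per distinct non-empty token
--     tokens = []
--     for i in theSlicedSurvey:
--         tokens += i[theString].split('; ')
--     seen = []
--     for t in tokens:
--         if t != '' and t not in seen:
--             seen.append(t)
--     return {t: tokens.count(t) for t in seen}
-- ===== Notes on version B (the rewrite author's own statement) =====
-- stated objective: alternative
-- what changed: Instead of incrementing per-token counts in a dict inside nested loops and deleting the empty key afterwards, B first flattens all tokens into one list, collects the distinct non-empty tokens in first-seen order, and builds the result with one list.count per distinct token.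
import Mathlib
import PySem

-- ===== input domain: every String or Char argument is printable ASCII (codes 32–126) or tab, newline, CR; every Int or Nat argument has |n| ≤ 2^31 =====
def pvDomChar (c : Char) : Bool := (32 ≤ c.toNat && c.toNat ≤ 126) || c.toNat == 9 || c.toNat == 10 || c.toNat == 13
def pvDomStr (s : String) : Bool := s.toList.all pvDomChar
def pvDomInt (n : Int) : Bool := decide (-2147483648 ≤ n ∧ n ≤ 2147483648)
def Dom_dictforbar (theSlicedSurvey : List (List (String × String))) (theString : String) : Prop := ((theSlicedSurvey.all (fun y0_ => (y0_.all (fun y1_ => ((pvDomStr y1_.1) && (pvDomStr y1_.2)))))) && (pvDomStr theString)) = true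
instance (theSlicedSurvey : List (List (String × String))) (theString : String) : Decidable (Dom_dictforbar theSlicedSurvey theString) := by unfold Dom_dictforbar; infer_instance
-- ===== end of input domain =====

-- B replaces A's nested hash-counting loops (and the final deletion of the '' key) by
-- flatten-all-tokens, collect distinct non-empty tokens in first-seen order, then one count per
-- distinct token; same return value, no speed claim.

-- ===== PORT A =====
def dictforbar (theSlicedSurvey : List (List (String × String))) (theString : String) : List (String × Int) :=
  let stringQ := theString
  let plotdict : PySem.Dict String Int :=
    theSlicedSurvey.foldl (fun plotdict i =>
      -- i[stringQ]: KeyError (none) is excluded by Pre_dictforbar; .getD "" is unreachable there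
      let answer := ((PySem.Dict.ofList i).get? stringQ).getD ""
      -- answer.split('; '): separator is nonempty, so split? is never none
      let answers := (PySem.Str.split? answer "; ").getD []
      answers.foldl (fun plotdict j =>
        if plotdict.contains j then plotdict.insert j (plotdict.getD j 0 + 1)
        else plotdict.insert j 1) plotdict) PySem.Dict.empty
  let plotdict := if plotdict.contains "" then plotdict.erase "" else plotdict
  plotdict.items

-- ===== PORT B =====
def dictforbar_alt (theSlicedSurvey : List (List (String × String))) (theString : String) : List (String × Int) :=
  let tokens : List String :=
    theSlicedSurvey.foldl (fun tokens i =>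
      tokens ++ (PySem.Str.split? (((PySem.Dict.ofList i).get? theString).getD "") "; ").getD []) []
  let seen : List String :=
    tokens.foldl (fun seen t => if t ≠ "" ∧ t ∉ seen then seen ++ [t] else seen) []
  seen.map (fun t => (t, (tokens.count t : Int)))

-- ===== PRECONDITION & SPEC =====
-- Pre_ excludes exactly the inputs where Python A raises KeyError: a row without the key theString.
def Pre_dictforbar (theSlicedSurvey : List (List (String × String))) (theString : String) : Prop :=
  ∀ i ∈ theSlicedSurvey, (PySem.Dict.ofList i).contains theString = true
instance (theSlicedSurvey : List (List (String × String))) (theString : String) : Decidable (Pre_dictforbar theSlicedSurvey theString) := by unfold Pre_dictforbar; infer_instance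
def pvWitness_dictforbar : (List (List (String × String))) × String :=
  ([[("Q", "a; b; a")], [("Q", "b")]], "Q")
def Spec_dictforbar (theSlicedSurvey : List (List (String × String))) (theString : String) (out : List (String × Int)) : Prop := out = dictforbar_alt theSlicedSurvey theString
instance (theSlicedSurvey : List (List (String × String))) (theString : String) (out : List (String × Int)) : Decidable (Spec_dictforbar theSlicedSurvey theString out) := by unfold Spec_dictforbar; infer_instance

-- ===== CLAIM (what is proved, stated in full; the proofs are below) =====
def Claim_equal_dictforbar : Prop := ∀ (theSlicedSurvey : List (List (String × String))) (theString : String), Dom_dictforbar theSlicedSurvey theString → Pre_dictforbar theSlicedSurvey theString → Spec_dictforbar theSlicedSurvey theString (dictforbar theSlicedSurvey theString)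

-- ===== LEMMAS AND PROOFS =====

-- A's counting step is the insert-of-getD+1 step (the two branches coincide when the key is absent).
theorem stepFunEq :
    (fun (d : PySem.Dict String Int) (j : String) =>
        if d.contains j then d.insert j (d.getD j 0 + 1) else d.insert j 1)
    = fun (d : PySem.Dict String Int) (x : String) => d.insert x (d.getD x 0 + 1) := by
  funext d j
  by_cases h : d.contains j = true
  · simp [h]
  · simp [h, PySem.Dict.getD_of_not_contains d 0 (by simpa using h)]

-- B's 'if t and t not in seen' loop is Set.add folded over the non-empty tokens.
theorem seen_eq_foldl_add (l : List String) (acc : List String) :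
    l.foldl (fun seen t => if t ≠ "" ∧ t ∉ seen then seen ++ [t] else seen) acc
      = (l.filter (fun t => t != "")).foldl PySem.Set.add acc := by
  induction l generalizing acc with
  | nil => rfl
  | cons x xs ih =>
    by_cases hx : x = ""
    · simp [hx, ih]
    · by_cases hm : x ∈ acc <;>
        simp [hx, hm, ih, PySem.Set.add, PySem.Set.contains]

-- filtering commutes with the Set.add fold (building the set of a filtered list).
theorem filter_foldl_add (p : String → Bool) (l : List String) (acc : List String) :
    (l.foldl PySem.Set.add acc).filter p = (l.filter p).foldl PySem.Set.add (acc.filter p) := by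
  induction l generalizing acc with
  | nil => rfl
  | cons x xs ih =>
    by_cases hp : p x = true
    · by_cases hm : x ∈ acc
      · have : x ∈ acc.filter p := List.mem_filter.mpr ⟨hm, hp⟩
        simp [hp, PySem.Set.add, PySem.Set.contains, hm, this, ih]
      · have : x ∉ acc.filter p := fun hc => hm (List.mem_filter.mp hc).1
        simp [hp, PySem.Set.add, PySem.Set.contains, hm, this, ih,
          List.filter_append]
    · by_cases hm : x ∈ acc <;>
        simp [hp, PySem.Set.add, PySem.Set.contains, hm, ih, List.filter_append]

-- ===== VERDICT (by name: the statement is the Claim_ definition above) =====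
theorem dictforbar_spec : Claim_equal_dictforbar := by
  intro s q _dom _pre
  unfold Spec_dictforbar
  simp only [dictforbar, dictforbar_alt]
  -- flatten B's token accumulation
  rw [PySem.List.foldl_append_eq_flatMap, List.nil_append]
  -- A's two counting branches coincide; then fuse the nested fold over the flattened tokens
  rw [stepFunEq, ← List.foldl_flatMap, PySem.Dict.foldl_insert_getD_add_one_eq_counter]
  generalize List.flatMap (fun i => (PySem.Str.split? (((PySem.Dict.ofList i).get? q).getD "") "; ").getD []) s = T
  -- B's seen list is the filtered first-occurrence set of the tokens
  rw [seen_eq_foldl_add, ← PySem.Set.ofList_eq_foldl]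
  have hcomm : PySem.Set.ofList (T.filter (fun t => t != ""))
      = (PySem.Set.ofList T).filter (fun t => t != "") := by
    rw [PySem.Set.ofList_eq_foldl, PySem.Set.ofList_eq_foldl, filter_foldl_add]
    rfl
  rw [hcomm]
  by_cases h : (PySem.Dict.counter T).contains "" = true
  · -- the '' key is present and deleted: both sides are the filtered map
    rw [if_pos h]
    have herase : ((PySem.Dict.counter T).erase "").items
        = (PySem.Dict.counter T).items.filter (fun p => !(p.1 == "")) := rfl
    rw [herase, PySem.Dict.items_counter, List.filter_map]
    rfl
  · -- no '' token at all: the filter keeps everything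
    rw [if_neg h]
    have hnotin : "" ∉ T := by
      have hcf : (PySem.Dict.counter T).contains "" = false := by simpa using h
      have hc := PySem.Dict.contains_counter T ""
      rw [hcf] at hc
      simpa using hc.symm
    have hfil : (PySem.Set.ofList T).filter (fun t => t != "") = PySem.Set.ofList T := by
      rw [List.filter_eq_self]
      intro a ha
      have : a ∈ T := (PySem.Set.mem_ofList T a).mp ha
      simp only [bne_iff_ne, ne_eq]
      intro heq; exact hnotin (heq ▸ this)
    rw [hfil, PySem.Dict.items_counter]
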